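-- pv_equiv track=rewrite | github.com/cesarmayta/CODIGO-G15 | semana01/dia3/libCrud.py | buscarAlumno
-- ===== SOURCE A (Python) =====
-- def buscarAlumno(valorBusqueda,listaAlumnos):
--     indiceAlumno = -1
--     for indice in range(len(listaAlumnos)):
--         alumno = listaAlumnos[indice]
--         for clave,valor in alumno.items():
--             if(clave == "email" and valor == valorBusqueda):
--                 indiceAlumno = indice
--                 break
--     return indiceAlumno
-- ===== SOURCE B (Python) =====
-- def buscarAlumno(valorBusqueda, listaAlumnos):
--     for i in range(len(listaAlumnos) - 1, -1, -1):
--         if any(clave == "email" and valor == valorBusqueda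
--                for clave, valor in listaAlumnos[i].items()):
--             return i
--     return -1
-- ===== Notes on version B (the rewrite author's own statement) =====
-- stated objective: simpler
-- what changed: Replaces A's full forward scan that keeps overwriting a last-match accumulator with a reverse index scan that returns the first (i.e. last) matching index immediately.
import Mathlib
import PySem

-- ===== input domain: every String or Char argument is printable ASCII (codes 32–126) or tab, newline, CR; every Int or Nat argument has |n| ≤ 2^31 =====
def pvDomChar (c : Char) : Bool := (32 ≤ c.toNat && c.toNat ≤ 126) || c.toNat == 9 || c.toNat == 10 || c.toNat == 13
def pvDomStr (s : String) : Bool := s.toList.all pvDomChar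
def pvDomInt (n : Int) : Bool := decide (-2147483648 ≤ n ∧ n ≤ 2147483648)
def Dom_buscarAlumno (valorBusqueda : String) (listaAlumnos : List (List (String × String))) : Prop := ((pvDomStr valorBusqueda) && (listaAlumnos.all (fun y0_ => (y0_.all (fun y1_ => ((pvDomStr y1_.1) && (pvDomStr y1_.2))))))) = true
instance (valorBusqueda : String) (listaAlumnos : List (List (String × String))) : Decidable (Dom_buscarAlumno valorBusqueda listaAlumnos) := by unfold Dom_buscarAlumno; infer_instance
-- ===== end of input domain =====

-- B replaces A's full forward scan with last-match accumulator by a reverse scan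
-- returning the first (= last) matching index immediately; objective: simpler.


-- ===== PORT A =====
-- inner 'for clave,valor in alumno.items(): if …: indiceAlumno = indice; break'
def pvInnerA (v : String) (pairs : List (String × String)) (idx acc : Int) : Int :=
  match pairs with
  | [] => acc
  | (clave, valor) :: rest =>
      if clave == "email" && valor == v then idx else pvInnerA v rest idx acc

-- outer 'for indice in range(len(listaAlumnos))' with accumulator indiceAlumno
def pvLoopA (v : String) (lst : List (List (String × String))) (idx acc : Int) : Int :=
  match lst with
  | [] => acc
  | alumno :: rest => pvLoopA v rest (idx + 1) (pvInnerA v alumno idx acc)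

def buscarAlumno (valorBusqueda : String) (listaAlumnos : List (List (String × String))) : Int :=
  pvLoopA valorBusqueda listaAlumnos 0 (-1)

-- ===== PORT B =====
def pvHasEmail (v : String) (alumno : List (String × String)) : Bool :=
  alumno.any (fun p => p.1 == "email" && p.2 == v)

-- 'for i in range(len(listaAlumnos)-1, -1, -1): if …: return i'; n counts down
def pvRevB (v : String) (lst : List (List (String × String))) : Nat → Int
  | 0 => -1
  | n + 1 => if pvHasEmail v (lst.getD n []) then (n : Int) else pvRevB v lst n

def buscarAlumno_alt (valorBusqueda : String) (listaAlumnos : List (List (String × String))) : Int :=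
  pvRevB valorBusqueda listaAlumnos listaAlumnos.length

-- ===== PRECONDITION & SPEC =====
def Spec_buscarAlumno (valorBusqueda : String) (listaAlumnos : List (List (String × String))) (out : Int) : Prop := out = buscarAlumno_alt valorBusqueda listaAlumnos
instance (valorBusqueda : String) (listaAlumnos : List (List (String × String))) (out : Int) : Decidable (Spec_buscarAlumno valorBusqueda listaAlumnos out) := by unfold Spec_buscarAlumno; infer_instance

-- ===== CLAIM (what is proved, stated in full; the proofs are below) =====
def Claim_equal_buscarAlumno : Prop := ∀ (valorBusqueda : String) (listaAlumnos : List (List (String × String))), Dom_buscarAlumno valorBusqueda listaAlumnos → Spec_buscarAlumno valorBusqueda listaAlumnos (buscarAlumno valorBusqueda listaAlumnos)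

-- ===== LEMMAS AND PROOFS =====
theorem pvInnerA_eq (v : String) (pairs : List (String × String)) (idx acc : Int) :
    pvInnerA v pairs idx acc = if pvHasEmail v pairs then idx else acc := by
  induction pairs with
  | nil => simp [pvInnerA, pvHasEmail]
  | cons p rest ih =>
      obtain ⟨k, val⟩ := p
      by_cases h : (k == "email" && val == v) = true <;>
        simp [pvInnerA, pvHasEmail, h] at * <;> simp [ih]

theorem pvRevB_nonneg_or (v : String) (lst : List (List (String × String))) (n : Nat) :
    pvRevB v lst n = -1 ∨ 0 ≤ pvRevB v lst n := by
  induction n with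
  | zero => left; rfl
  | succ n ih =>
      simp only [pvRevB]
      split
      · exact Or.inr (Int.natCast_nonneg n)
      · exact ih

theorem pvRevB_cons (v : String) (a : List (String × String))
    (lst : List (List (String × String))) (n : Nat) :
    pvRevB v (a :: lst) (n + 1) =
      if pvRevB v lst n = -1 then (if pvHasEmail v a then 0 else -1)
      else pvRevB v lst n + 1 := by
  induction n with
  | zero => simp [pvRevB]
  | succ n ih =>
      have hg : (a :: lst).getD (n + 1) [] = lst.getD n [] := rfl
      have hc : ((n + 1 : Nat) : Int) = (n : Int) + 1 := by push_cast; ring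
      have r1 : pvRevB v lst (n + 1) =
          if pvHasEmail v (lst.getD n []) = true then (n : Int) else pvRevB v lst n := rfl
      have l1 : pvRevB v (a :: lst) (n + 1 + 1) =
          if pvHasEmail v (lst.getD n []) = true then (n : Int) + 1
          else pvRevB v (a :: lst) (n + 1) := by
        rw [show pvRevB v (a :: lst) (n + 1 + 1) =
            (if pvHasEmail v ((a :: lst).getD (n + 1) []) = true then ((n + 1 : Nat) : Int)
             else pvRevB v (a :: lst) (n + 1)) from rfl, hg, hc]
      rw [l1, r1]
      by_cases h : pvHasEmail v (lst.getD n []) = true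
      · have hne : ((n : Int)) ≠ -1 := by omega
        rw [if_pos h, if_pos h, if_neg hne]
      · rw [if_neg h, if_neg h, ih]

theorem pvLoopA_eq (v : String) (lst : List (List (String × String))) (off acc : Int) :
    pvLoopA v lst off acc =
      if pvRevB v lst lst.length = -1 then acc else off + pvRevB v lst lst.length := by
  induction lst generalizing off acc with
  | nil => simp [pvLoopA, pvRevB]
  | cons a rest ih =>
      have hcons := pvRevB_cons v a rest rest.length
      rcases pvRevB_nonneg_or v rest rest.length with h1 | h1
      · by_cases ha : pvHasEmail v a = true <;>
          simp [pvLoopA, pvInnerA_eq, ha, ih, h1, List.length_cons, hcons]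
      · have hne : pvRevB v rest rest.length ≠ -1 := by omega
        have hne2 : pvRevB v rest rest.length + 1 ≠ -1 := by omega
        simp [pvLoopA, pvInnerA_eq, ih, List.length_cons, hcons, hne, hne2]
        ring

-- ===== VERDICT (by name: the statement is the Claim_ definition above) =====
theorem buscarAlumno_spec : Claim_equal_buscarAlumno := by
  intro v lst _
  unfold Spec_buscarAlumno buscarAlumno buscarAlumno_alt
  rcases pvRevB_nonneg_or v lst lst.length with h | h <;>
    simp [pvLoopA_eq, h]
  omega
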